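-- pv_equiv track=rewrite | github.com/Ved-programmer/Login-System | Login system/hashing.py | increaseStringSize
-- ===== SOURCE A (Python) =====
-- letter = """abcdefghijklmnopqrstuvwxyz"""
--
-- def increaseStringSize(string):
--     final = ""
--
--     for i in string:
--         final += letter[(letter.index(i) + len(final)) % len(letter) - 1]
--
--     cur = final
--     increasedSizedString = ""
--
--     for j in range(len(cur)):
--         idx1 = (letter.index(cur[j]) + len(string)) % len(letter)
--         if string[j] in "abcdefghijklmnopqrstuvwxyz .-'_=":idx2 = (letter.index(cur[j]) // len(string)) % len(letter)
--         else:idx2 = letter.index(string[j]) + 2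
--         idx3 = abs(letter.index(cur[j]) - len(string)) % len(letter)
--         increasedSizedString += letter[idx1] + letter[idx2] + letter[idx3]
--     return increasedSizedString
-- ===== SOURCE B (Python) =====
-- def increaseStringSize(string):
--     n = len(string)
--
--     def triple(j, c):
--         f = (ord(c) - 97 + j + 25) % 26
--         return chr(97 + (f + n) % 26) + chr(97 + (f // n) % 26) + chr(97 + abs(f - n) % 26)
--
--     return "".join(triple(j, c) for j, c in enumerate(string))
-- ===== Notes on version B (the rewrite author's own statement) =====
-- stated objective: faster
-- what changed: Fused A's build-then-scan two-pass (construct the intermediate string 'final', then rescan it) into a single enumerate pass that emits each three-letter chunk directly, and replaced the letter.index / letter[...] 26-element table scans and repeated string concatenation by ord/chr arithmetic with a join.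
import Mathlib
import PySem

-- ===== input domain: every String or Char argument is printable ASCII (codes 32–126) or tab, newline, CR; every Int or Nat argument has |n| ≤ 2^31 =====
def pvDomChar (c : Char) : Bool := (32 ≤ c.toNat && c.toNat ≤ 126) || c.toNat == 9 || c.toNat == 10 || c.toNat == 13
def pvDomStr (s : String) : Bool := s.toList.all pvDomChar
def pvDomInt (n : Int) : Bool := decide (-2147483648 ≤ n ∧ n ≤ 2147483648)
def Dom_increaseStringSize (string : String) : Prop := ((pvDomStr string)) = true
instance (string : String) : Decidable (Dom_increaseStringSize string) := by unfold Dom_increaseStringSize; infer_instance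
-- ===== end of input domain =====

-- B fuses A's two passes into one enumerate pass and replaces the letter.index / letter[...] table scans by ord/chr arithmetic (objective: faster, measured).

-- ===== PORT A =====
def pvLetter : List Char :=
  ['a','b','c','d','e','f','g','h','i','j','k','l','m','n','o','p','q','r','s','t','u','v','w','x','y','z']

-- letter.index(c); Python raises ValueError when c is absent — those inputs are excluded by Pre_ (the getD default is never reached inside Pre_)
def pvIdxA (c : Char) : Int := ((PySem.List.index? pvLetter c).getD 0 : Nat)

-- letter[t] with a possibly negative t (Python wraparound; t is always in range -1..25 here)
def pvGetL (t : Int) : Char := PySem.List.pyGetD pvLetter t ' '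

-- the membership string "abcdefghijklmnopqrstuvwxyz .-'_=" of A's second loop
def pvMemberSet : List Char := pvLetter ++ [' ', '.', '-', '\'', '_', '=']

-- first loop: final += letter[(letter.index(i) + len(final)) % len(letter) - 1]
def pvPhase1 : List Char → List Char → List Char
  | [], final => final
  | i :: rest, final =>
      pvPhase1 rest
        (final ++ [pvGetL (PySem.Int.mod (pvIdxA i + (final.length : Int)) (pvLetter.length : Int) - 1)])

def increaseStringSize (string : String) : String :=
  let s := string.toList
  let cur := pvPhase1 s []
  let r := (PySem.List.pyRange 0 (cur.length : Int)).foldl (fun acc j =>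
      let cj := PySem.List.pyGetD cur j ' '
      let sj := PySem.List.pyGetD s j ' '
      let idx1 := PySem.Int.mod (pvIdxA cj + (s.length : Int)) (pvLetter.length : Int)
      let idx2 := if sj ∈ pvMemberSet then
          PySem.Int.mod (PySem.Int.floordiv (pvIdxA cj) (s.length : Int)) (pvLetter.length : Int)
        else pvIdxA sj + 2
      let idx3 := PySem.Int.mod |pvIdxA cj - (s.length : Int)| (pvLetter.length : Int)
      acc ++ [pvGetL idx1, pvGetL idx2, pvGetL idx3]) []
  String.ofList r

-- ===== PORT B =====
def pvChr (i : Int) : Char := Char.ofNat i.toNat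

def pvTriple (n : Int) (j : Int) (c : Char) : List Char :=
  let f := PySem.Int.mod ((c.toNat : Int) - 97 + j + 25) 26
  [ pvChr (97 + PySem.Int.mod (f + n) 26),
    pvChr (97 + PySem.Int.mod (PySem.Int.floordiv f n) 26),
    pvChr (97 + PySem.Int.mod |f - n| 26) ]

def increaseStringSize_alt (string : String) : String :=
  let n : Int := (string.toList.length : Int)
  String.ofList ((PySem.List.enumerate string.toList 0).flatMap (fun p => pvTriple n p.1 p.2))

-- ===== PRECONDITION & SPEC =====
-- Pre_ excludes exactly the inputs containing a character that is not a lowercase ASCII letter, on which A raises ValueError (letter.index).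
def Pre_increaseStringSize (string : String) : Prop :=
  (string.toList.all (fun c => 97 ≤ c.toNat && c.toNat ≤ 122)) = true
instance (string : String) : Decidable (Pre_increaseStringSize string) := by
  unfold Pre_increaseStringSize; infer_instance

def pvWitness_increaseStringSize : String := "abc"

def Spec_increaseStringSize (string : String) (out : String) : Prop := out = increaseStringSize_alt string
instance (string : String) (out : String) : Decidable (Spec_increaseStringSize string out) := by
  unfold Spec_increaseStringSize; infer_instance

-- ===== CLAIM (what is proved, stated in full; the proofs are below) =====
def Claim_equal_increaseStringSize : Prop := ∀ (string : String), Dom_increaseStringSize string → Pre_increaseStringSize string → Spec_increaseStringSize string (increaseStringSize string)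

-- ===== LEMMAS AND PROOFS =====

-- letter.index of a lowercase letter
theorem idxA_of_range : ∀ u : Nat, u < 26 → pvIdxA (Char.ofNat (97 + u)) = ((97 + u : Nat) : Int) - 97 := by
  decide

-- letter[t - 1] for 0 ≤ t < 26 (t = 0 wraps to 'z')
theorem getL_pred : ∀ t : Nat, t < 26 →
    pvGetL ((t : Int) - 1) = Char.ofNat (97 + (t + 25) % 26) := by
  decide

theorem getL_eq_chr_nat : ∀ v : Nat, v < 26 → pvGetL (v : Int) = pvChr (97 + (v : Int)) := by decide

theorem getL_eq_chr (i : Int) (h0 : 0 ≤ i) (h1 : i < 26) : pvGetL i = pvChr (97 + i) := by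
  obtain ⟨v, rfl⟩ := Int.eq_ofNat_of_zero_le h0
  exact getL_eq_chr_nat v (by exact_mod_cast h1)

theorem mem_memberSet : ∀ u : Nat, u < 26 → Char.ofNat (97 + u) ∈ pvMemberSet := by
  decide

-- characterization of A's first loop
theorem phase1_spec (l acc : List Char) :
    pvPhase1 l acc = acc ++ (List.range l.length).map
      (fun j => pvGetL (PySem.Int.mod (pvIdxA (l.getD j ' ') + ((acc.length + j : Nat) : Int)) 26 - 1)) := by
  induction l generalizing acc with
  | nil => simp [pvPhase1]
  | cons c rest ih =>
      have hlen : (pvLetter.length : Int) = 26 := by decide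
      rw [pvPhase1, ih, hlen, List.append_assoc]
      refine congrArg _ ?_
      rw [List.length_cons, List.range_succ_eq_map, List.map_cons, List.map_map]
      refine List.cons_eq_cons.mpr ⟨by simp, ?_⟩
      refine List.map_congr_left fun j hj => ?_
      show pvGetL _ = pvGetL _
      congr 1
      have h1 : ((acc ++ [pvGetL (PySem.Int.mod (pvIdxA c + (acc.length : Int)) 26 - 1)]).length + j : Nat)
          = (acc.length + Nat.succ j : Nat) := by simp; omega
      rw [List.getD_cons_succ, h1]

-- B's flatMap over enumerate as a flatten of ranged chunks
theorem enum_flatMap_spec (l : List Char) (g : Int → Char → List Char) :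
    ∀ k : Nat, (PySem.List.enumerate l (k : Int)).flatMap (fun p => g p.1 p.2)
      = ((List.range l.length).map (fun j => g ((k + j : Nat) : Int) (l.getD j ' '))).flatten := by
  induction l with
  | nil => intro k; simp [PySem.List.enumerate]
  | cons c rest ih =>
      intro k
      rw [PySem.List.enumerate_cons]
      have hk1 : ((k : Int) + 1) = ((k + 1 : Nat) : Int) := by push_cast; ring
      rw [List.flatMap_cons, hk1, ih (k + 1), List.length_cons, List.range_succ_eq_map,
        List.map_cons, List.flatten_cons, List.map_map]
      refine congrArg₂ _ (by norm_num) (congrArg _ ?_)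
      refine List.map_congr_left fun j hj => ?_
      show g _ _ = g _ _
      rw [List.getD_cons_succ]
      congr 1
      push_cast
      ring

-- per-index equality of A's three-letter chunk and B's triple, for a lowercase c
theorem chunk_eq (n : Int) (j : Nat) (c : Char) (h97 : 97 ≤ c.toNat) (h122 : c.toNat ≤ 122) :
    [ pvGetL (PySem.Int.mod (pvIdxA (pvGetL (PySem.Int.mod (pvIdxA c + (j : Int)) 26 - 1)) + n) (pvLetter.length : Int)),
      pvGetL (if c ∈ pvMemberSet then
          PySem.Int.mod (PySem.Int.floordiv (pvIdxA (pvGetL (PySem.Int.mod (pvIdxA c + (j : Int)) 26 - 1))) n) (pvLetter.length : Int)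
        else pvIdxA c + 2),
      pvGetL (PySem.Int.mod |pvIdxA (pvGetL (PySem.Int.mod (pvIdxA c + (j : Int)) 26 - 1)) - n| (pvLetter.length : Int)) ]
    = pvTriple n (j : Int) c := by
  have hlen : (pvLetter.length : Int) = 26 := by decide
  have hkn : c.toNat - 97 < 26 := by omega
  have hct : c.toNat = 97 + (c.toNat - 97) := by omega
  have hceq : c = Char.ofNat (97 + (c.toNat - 97)) := by rw [← hct, Char.ofNat_toNat]
  have hidxc : pvIdxA c = ((c.toNat - 97 : Nat) : Int) := by
    conv_lhs => rw [hceq]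
    rw [idxA_of_range _ hkn]
    push_cast
    omega
  have hmem : c ∈ pvMemberSet := by
    have hm := mem_memberSet _ hkn
    rwa [← hceq] at hm
  have hmodc : ∀ m : Nat, PySem.Int.mod (m : Int) 26 = (((m % 26 : Nat)) : Int) := fun m => by
    exact_mod_cast PySem.Int.mod_natCast m 26
  have harg1 : pvIdxA c + (j : Int) = ((c.toNat - 97 + j : Nat) : Int) := by
    rw [hidxc]; push_cast; ring
  have ht : (c.toNat - 97 + j) % 26 < 26 := Nat.mod_lt _ (by norm_num)
  have hu26 : (c.toNat - 97 + j + 25) % 26 < 26 := Nat.mod_lt _ (by norm_num)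
  have hu : ((c.toNat - 97 + j) % 26 + 25) % 26 = (c.toNat - 97 + j + 25) % 26 := by omega
  have hidxcur : pvIdxA (pvGetL (PySem.Int.mod (pvIdxA c + (j : Int)) 26 - 1))
      = (((c.toNat - 97 + j + 25) % 26 : Nat) : Int) := by
    rw [harg1, hmodc, getL_pred _ ht, hu, idxA_of_range _ hu26]
    push_cast
    omega
  have hf : PySem.Int.mod ((c.toNat : Int) - 97 + (j : Int) + 25) 26
      = (((c.toNat - 97 + j + 25) % 26 : Nat) : Int) := by
    have harg : ((c.toNat : Int) - 97 + (j : Int) + 25) = ((c.toNat - 97 + j + 25 : Nat) : Int) := by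
      push_cast
      omega
    rw [harg, hmodc]
  rw [pvTriple]
  simp only [hidxcur, hf, if_pos hmem, hlen]
  rw [getL_eq_chr _ (PySem.Int.mod_nonneg _ (by norm_num)) (PySem.Int.mod_lt _ (by norm_num)),
    getL_eq_chr _ (PySem.Int.mod_nonneg _ (by norm_num)) (PySem.Int.mod_lt _ (by norm_num)),
    getL_eq_chr _ (PySem.Int.mod_nonneg _ (by norm_num)) (PySem.Int.mod_lt _ (by norm_num))]

-- ===== VERDICT (by name: the statement is the Claim_ definition above) =====
theorem increaseStringSize_spec : Claim_equal_increaseStringSize := by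
  intro string _hdom hpre
  unfold Pre_increaseStringSize at hpre
  unfold Spec_increaseStringSize increaseStringSize increaseStringSize_alt
  simp only []
  refine congrArg String.ofList ?_
  have hphase := phase1_spec string.toList []
  simp only [List.nil_append, List.length_nil, Nat.zero_add] at hphase
  rw [hphase]
  have henum := enum_flatMap_spec string.toList
    (fun i c => pvTriple (string.toList.length : Int) i c) 0
  simp only [Nat.cast_zero, Nat.zero_add] at henum
  rw [henum]
  rw [PySem.List.foldl_append_eq_flatMap, List.nil_append, List.length_map, List.length_range,
    PySem.List.pyRange_zero_nat, List.flatMap_map, List.flatMap_def]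
  refine congrArg List.flatten (List.map_congr_left fun j hj => ?_)
  have hjl : j < string.toList.length := List.mem_range.mp hj
  rw [PySem.List.pyGetD_natCast, PySem.List.pyGetD_natCast,
    PySem.List.getD_map_range _ _ _ _ hjl]
  have hc : string.toList.getD j ' ' ∈ string.toList := by
    rw [List.getD_eq_getElem _ _ hjl]
    exact List.getElem_mem _
  have hb := List.all_eq_true.mp hpre _ hc
  simp only [Bool.and_eq_true, decide_eq_true_eq] at hb
  obtain ⟨h97, h122⟩ := hb
  exact chunk_eq (string.toList.length : Int) j (string.toList.getD j ' ') h97 h122
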